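-- pv_equiv track=rewrite | github.com/NetSPI/OCInferno | ocinferno/modules/everything/enumeration/enum_all.py | _split_csv_tokens
-- ===== SOURCE A (Python) =====
-- from typing import Any, Dict, List, Optional, Set, Tuple
--
-- def _split_csv_tokens(raw_tokens: Optional[List[str]]) -> List[str]:
--     out: List[str] = []
--     for token in raw_tokens or []:
--         if token is None:
--             continue
--         for part in str(token).split(","):
--             p = str(part or "").strip().lower().replace("-", "_")
--             if p:
--                 out.append(p)
--     return out
-- ===== SOURCE B (Python) =====
-- from typing import List, Optional
--
--
-- def _split_csv_tokens(raw_tokens: Optional[List[str]]) -> List[str]: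
--     # Character-level state machine: one scan over each token's characters,
--     # normalizing on the fly (no split/strip/lower/replace string calls).
--     out: List[str] = []
--     for token in raw_tokens or []:
--         if token is None:
--             continue
--         buf: List[str] = []
--         for ch in str(token):
--             if ch == ",":
--                 _flush(buf, out)
--             elif ch == "-":
--                 buf.append("_")
--             elif "A" <= ch <= "Z":
--                 buf.append(chr(ord(ch) + 32))
--             else:
--                 buf.append(ch)
--         _flush(buf, out)
--     return out
--
--
-- def _flush(buf: List[str], out: List[str]) -> None:
--     # trim whitespace from both ends with two index pointers, emit if nonempty
--     i, j = 0, len(buf)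
--     while i < j and buf[i].isspace():
--         i += 1
--     while j > i and buf[j - 1].isspace():
--         j -= 1
--     if i < j:
--         out.append("".join(buf[i:j]))
--     buf.clear()
-- ===== Notes on version B (the rewrite author's own statement) =====
-- stated objective: alternative
-- what changed: B replaces A's per-token split(",") plus strip/lower/replace string pipeline with a character-level state machine: a single scan per token that normalizes each character on the fly ('-'->'_', ASCII upper->lower) into a buffer and flushes the whitespace-trimmed buffer at each comma and at token end.
import Mathlib
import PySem

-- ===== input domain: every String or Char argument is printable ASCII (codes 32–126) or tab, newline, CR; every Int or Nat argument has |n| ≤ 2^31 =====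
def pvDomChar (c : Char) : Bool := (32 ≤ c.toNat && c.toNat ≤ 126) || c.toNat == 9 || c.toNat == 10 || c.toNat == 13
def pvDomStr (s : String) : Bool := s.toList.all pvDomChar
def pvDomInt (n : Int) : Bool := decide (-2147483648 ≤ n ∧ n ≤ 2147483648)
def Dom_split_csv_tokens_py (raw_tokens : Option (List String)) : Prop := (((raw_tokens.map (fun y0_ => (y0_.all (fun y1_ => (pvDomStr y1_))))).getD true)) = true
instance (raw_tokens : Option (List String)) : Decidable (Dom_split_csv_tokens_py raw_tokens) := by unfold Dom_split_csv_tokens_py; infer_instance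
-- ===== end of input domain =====

-- B replaces A's per-token split(",") + strip/lower/replace string pipeline with a
-- character-level state machine: one scan per token that normalizes each character on
-- the fly into a buffer and flushes it at commas (objective: alternative decomposition).

-- ===== PORT A =====
-- s.split(",")
def pvSplitComma (s : String) : List String :=
  (PySem.Chars.splitOn s.toList [',']).map String.ofList

-- in A, `str(part or "")` is the identity on str input (str(part) = part; `part or ""` = part
-- for nonempty part and "" for ""), so the normalization is strip → lower → replace
def pvNorm (part : String) : String :=
  PySem.Str.replace (PySem.Str.lower (PySem.Str.strip part)) "-" "_"

def split_csv_tokens_py (raw_tokens : Option (List String)) : List String :=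
  -- `for token in raw_tokens or []` ; `if token is None: continue` never fires (tokens are str)
  (raw_tokens.getD []).foldl (fun out token =>
    (pvSplitComma token).foldl (fun out part =>
      let p := pvNorm part
      if p ≠ "" then out ++ [p] else out) out) []

-- ===== PORT B =====
-- Source B's per-character normalization branches: '-' → '_', 'A'..'Z' → +32, else unchanged
def pvMapChar (c : Char) : Char :=
  if c = '-' then '_'
  else if 'A' ≤ c ∧ c ≤ 'Z' then Char.ofNat (c.toNat + 32)
  else c

-- Source B's _flush: the two trimming while-loops (dropWhile from the front, and from the
-- back via reverse), append the word if nonempty; buf is reset by the caller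
def pvFlush (out : List String) (buf : List Char) : List String :=
  let t := ((buf.dropWhile PySem.Chars.isspace).reverse.dropWhile PySem.Chars.isspace).reverse
  if t.isEmpty then out else out ++ [String.ofList t]

def split_csv_tokens_py_alt (raw_tokens : Option (List String)) : List String :=
  (raw_tokens.getD []).foldl (fun out token =>
    let st := token.toList.foldl
      (fun (st : List String × List Char) ch =>
        if ch = ',' then (pvFlush st.1 st.2, []) else (st.1, st.2 ++ [pvMapChar ch]))
      (out, [])
    pvFlush st.1 st.2) []

-- ===== PRECONDITION & SPEC =====
def Spec_split_csv_tokens_py (raw_tokens : Option (List String)) (out : List String) : Prop := out = split_csv_tokens_py_alt raw_tokens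
instance (raw_tokens : Option (List String)) (out : List String) : Decidable (Spec_split_csv_tokens_py raw_tokens out) := by unfold Spec_split_csv_tokens_py; infer_instance

-- ===== CLAIM (what is proved, stated in full; the proofs are below) =====
def Claim_equal_split_csv_tokens_py : Prop := ∀ (raw_tokens : Option (List String)), Dom_split_csv_tokens_py raw_tokens → Spec_split_csv_tokens_py raw_tokens (split_csv_tokens_py raw_tokens)

-- ===== LEMMAS AND PROOFS =====

-- a clean structural recursion computing split-on-comma
def pvMySplit : List Char → List (List Char)
  | [] => [[]]
  | c :: rest => if c = ',' then [] :: pvMySplit rest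
                 else (pvMySplit rest).modifyHead (c :: ·)

theorem pvMySplit_ne_nil (l : List Char) : pvMySplit l ≠ [] := by
  cases l with
  | nil => simp [pvMySplit]
  | cons c rest =>
    simp only [pvMySplit]
    split_ifs
    · simp
    · cases h : pvMySplit rest with
      | nil => exact absurd h (pvMySplit_ne_nil rest)
      | cons a t => simp

theorem pv_go_inv (fuel : Nat) (l cur : List Char) (acc : List (List Char))
    (h : l.length ≤ fuel) :
    PySem.Chars.splitOn.go [','] fuel l cur acc
      = acc.reverse ++ (pvMySplit l).modifyHead (cur.reverse ++ ·) := by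
  induction fuel generalizing l cur acc with
  | zero =>
    have hl : l = [] := List.eq_nil_of_length_eq_zero (Nat.le_zero.mp h)
    subst hl
    rw [PySem.Chars.splitOn.go.eq_def]
    simp [pvMySplit]
  | succ fuel ih =>
    cases l with
    | nil =>
      rw [PySem.Chars.splitOn.go.eq_def]
      simp [pvMySplit]
    | cons c rest =>
      rw [PySem.Chars.splitOn.go.eq_def]
      simp only [List.isPrefixOf, Bool.and_true]
      by_cases hc : c = ','
      · subst hc
        simp only [beq_self_eq_true, if_pos]
        rw [show List.drop [','].length (',' :: rest) = rest from rfl]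
        rw [ih rest [] (List.reverse cur :: acc) (by simpa using Nat.le_of_succ_le_succ h)]
        cases hms : pvMySplit rest with
        | nil => exact absurd hms (pvMySplit_ne_nil rest)
        | cons a tl =>
          simp only [pvMySplit, if_true, List.reverse_cons, List.reverse_nil,
            List.nil_append, List.modifyHead_cons, List.append_assoc, List.cons_append,
            List.append_nil]
          rw [hms]
      · have : ((',' : Char) == c) = false := beq_eq_false_iff_ne.mpr (fun h => hc h.symm)
        simp only [this, Bool.false_eq_true, if_false]
        rw [ih rest (c :: cur) acc (by simpa using Nat.le_of_succ_le_succ h)]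
        simp only [pvMySplit, if_neg hc]
        cases hms : pvMySplit rest with
        | nil => exact absurd hms (pvMySplit_ne_nil rest)
        | cons a t =>
          simp only [List.modifyHead_cons, List.reverse_cons, List.append_assoc,
            List.cons_append, List.nil_append]

theorem pv_splitOn_eq (s : List Char) : PySem.Chars.splitOn s [','] = pvMySplit s := by
  show PySem.Chars.splitOn.go [','] (s.length + 1) s [] [] = pvMySplit s
  rw [pv_go_inv (s.length + 1) s [] [] (Nat.le_succ _)]
  cases h : pvMySplit s with
  | nil => exact absurd h (pvMySplit_ne_nil s)
  | cons a t => simp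

-- Char.ofNat is transparent below the surrogate range
theorem pv_toNat_ofNat (n : Nat) (h : n < 55296) : (Char.ofNat n).toNat = n := by
  unfold Char.ofNat
  split
  · simp [Char.ofNatAux, Char.toNat]
  · next hv => exact absurd (Or.inl (by exact_mod_cast h)) hv

-- the single-character replacement A performs, as a character map
def pvRepl (c : Char) : Char := if c = '-' then '_' else c

theorem pv_replace_go (fuel : Nat) (l acc : List Char) (h : l.length ≤ fuel) :
    PySem.Chars.replace.go ['-'] ['_'] fuel l acc = acc.reverse ++ l.map pvRepl := by
  induction fuel generalizing l acc with
  | zero =>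
    have hl : l = [] := List.eq_nil_of_length_eq_zero (Nat.le_zero.mp h)
    subst hl; rw [PySem.Chars.replace.go.eq_def]; simp
  | succ fuel ih =>
    cases l with
    | nil => rw [PySem.Chars.replace.go.eq_def]; simp
    | cons c rest =>
      rw [PySem.Chars.replace.go.eq_def]
      simp only [List.isPrefixOf, Bool.and_true]
      by_cases hc : c = '-'
      · subst hc
        simp only [beq_self_eq_true, if_pos]
        rw [show List.drop ['-'].length ('-' :: rest) = rest from rfl]
        rw [ih rest _ (by simpa using Nat.le_of_succ_le_succ h)]
        simp [pvRepl, List.map_cons]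
      · have : (('-' : Char) == c) = false := beq_eq_false_iff_ne.mpr (fun h => hc h.symm)
        simp only [this, Bool.false_eq_true, if_false]
        rw [ih rest _ (by simpa using Nat.le_of_succ_le_succ h)]
        simp [pvRepl, hc]

theorem pv_replace_dash (l : List Char) :
    PySem.Chars.replace l ['-'] ['_'] = l.map pvRepl := by
  show PySem.Chars.replace.go ['-'] ['_'] l.length l [] = _
  rw [pv_replace_go l.length l [] (Nat.le_refl _)]
  simp

-- A's per-character pipeline lower-then-replace equals B's pvMapChar
theorem pv_repl_lower (c : Char) : pvRepl (PySem.Chars.lowerChar c) = pvMapChar c := by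
  unfold pvRepl PySem.Chars.lowerChar PySem.Chars.isupper pvMapChar
  by_cases hu : 'A' ≤ c ∧ c ≤ 'Z'
  · have h1 : 65 ≤ c.toNat := hu.1
    have h2 : c.toNat ≤ 90 := hu.2
    have hb : (decide ('A' ≤ c) && decide (c ≤ 'Z')) = true := by
      simp [hu.1, hu.2]
    have ht : (Char.ofNat (c.toNat + 32)).toNat = c.toNat + 32 :=
      pv_toNat_ofNat _ (by omega)
    have hne : Char.ofNat (c.toNat + 32) ≠ '-' := by
      intro he
      rw [he] at ht
      have h45 : ('-' : Char).toNat = 45 := by decide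
      omega
    have hcd : c ≠ '-' := by
      intro he; subst he; revert h1; decide
    rw [if_pos hb, if_neg hne, if_neg hcd, if_pos hu]
  · have hb : (decide ('A' ≤ c) && decide (c ≤ 'Z')) = false := by
      simpa [Bool.and_eq_true, decide_eq_true_eq] using hu
    simp [hb, hu]

-- pvMapChar preserves whitespace-ness (it maps letters to letters and '-' to '_')
theorem pv_isspace_mapChar (c : Char) :
    PySem.Chars.isspace (pvMapChar c) = PySem.Chars.isspace c := by
  unfold pvMapChar
  by_cases hd : c = '-'
  · subst hd; decide
  · by_cases hu : 'A' ≤ c ∧ c ≤ 'Z'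
    · have h1 : 65 ≤ c.toNat := hu.1
      have h2 : c.toNat ≤ 90 := hu.2
      have ht : (Char.ofNat (c.toNat + 32)).toNat = c.toNat + 32 :=
        pv_toNat_ofNat _ (by omega)
      have hsl : PySem.Chars.isspace (Char.ofNat (c.toNat + 32)) = false := by
        unfold PySem.Chars.isspace
        simp only [ht, Bool.or_eq_false_iff, Bool.and_eq_false_iff,
          decide_eq_false_iff_not]
        omega
      have hsr : PySem.Chars.isspace c = false := by
        unfold PySem.Chars.isspace
        simp only [Bool.or_eq_false_iff, Bool.and_eq_false_iff,
          decide_eq_false_iff_not]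
        omega
      rw [if_neg hd, if_pos hu, hsl, hsr]
    · rw [if_neg hd, if_neg hu]

-- A's full normalization on a raw segment = strip after B's character map
theorem pv_norm_chars (l : List Char) :
    (pvNorm (String.ofList l)).toList
      = PySem.Chars.strip (l.map pvMapChar) := by
  unfold pvNorm
  rw [PySem.Str.toList_replace]
  simp only [PySem.Str.toList_lower, PySem.Str.toList_strip, String.toList_ofList]
  rw [show ("-" : String).toList = ['-'] from rfl, show ("_" : String).toList = ['_'] from rfl]
  rw [pv_replace_dash]
  unfold PySem.Chars.lower
  rw [List.map_map]
  have hmap : ∀ m : List Char, m.map (pvRepl ∘ PySem.Chars.lowerChar) = m.map pvMapChar := by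
    intro m
    exact List.map_congr_left (fun c _ => pv_repl_lower c)
  rw [hmap]
  -- strip commutes with the character map since pvMapChar preserves isspace
  unfold PySem.Chars.strip PySem.Chars.lstrip PySem.Chars.rstrip
  have hdw : ∀ m : List Char,
      List.dropWhile PySem.Chars.isspace (m.map pvMapChar)
        = (List.dropWhile PySem.Chars.isspace m).map pvMapChar := by
    intro m
    rw [List.dropWhile_map,
      show PySem.Chars.isspace ∘ pvMapChar = PySem.Chars.isspace from funext pv_isspace_mapChar]
  rw [hdw, ← List.map_reverse, hdw, List.map_reverse]

-- the A-side per-part step, phrased through pvFlush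
theorem pv_step_eq_flush (out : List String) (seg : List Char) :
    (if pvNorm (String.ofList seg) ≠ "" then out ++ [pvNorm (String.ofList seg)] else out)
      = pvFlush out (seg.map pvMapChar) := by
  unfold pvFlush
  have ht : ((List.dropWhile PySem.Chars.isspace (seg.map pvMapChar)).reverse.dropWhile
      PySem.Chars.isspace).reverse = (pvNorm (String.ofList seg)).toList := by
    rw [pv_norm_chars]; rfl
  rw [ht]
  by_cases h : pvNorm (String.ofList seg) = ""
  · simp [h]
  · have hne : (pvNorm (String.ofList seg)).toList ≠ [] := by
      intro hl
      apply h
      have h2 := congrArg String.ofList hl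
      rwa [String.ofList_toList] at h2
    simp [h, List.isEmpty_iff, hne, String.ofList_toList]

-- B's in-token machine, named for the induction
def pvStepB (st : List String × List Char) (ch : Char) : List String × List Char :=
  if ch = ',' then (pvFlush st.1 st.2, []) else (st.1, st.2 ++ [pvMapChar ch])

-- characterization of B's machine: fold-then-final-flush = flush each split segment
theorem pv_machine (l : List Char) (out : List String) (buf : List Char) :
    pvFlush (l.foldl pvStepB (out, buf)).1 (l.foldl pvStepB (out, buf)).2
      = (((pvMySplit l).map (·.map pvMapChar)).modifyHead (buf ++ ·)).foldl pvFlush out := by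
  induction l generalizing out buf with
  | nil => simp [pvMySplit, List.foldl]
  | cons c rest ih =>
    simp only [List.foldl_cons]
    by_cases hc : c = ','
    · subst hc
      have hs : pvStepB (out, buf) ',' = (pvFlush out buf, []) := by
        simp [pvStepB]
      rw [hs, ih (pvFlush out buf) [],
        show pvMySplit (',' :: rest) = [] :: pvMySplit rest from by simp [pvMySplit]]
      cases hms : (pvMySplit rest).map (·.map pvMapChar) with
      | nil => exact absurd (List.map_eq_nil_iff.mp hms) (pvMySplit_ne_nil rest)
      | cons a t => simp [hms]
    · have hs : pvStepB (out, buf) c = (out, buf ++ [pvMapChar c]) := by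
        simp [pvStepB, hc]
      rw [hs, ih out (buf ++ [pvMapChar c])]
      simp only [pvMySplit, if_neg hc]
      cases hms : pvMySplit rest with
      | nil => exact absurd hms (pvMySplit_ne_nil rest)
      | cons a t =>
        simp [List.modifyHead_cons, List.append_assoc]

-- ===== VERDICT (by name: the statement is the Claim_ definition above) =====
theorem split_csv_tokens_py_spec : Claim_equal_split_csv_tokens_py := by
  intro raw_tokens _
  unfold Spec_split_csv_tokens_py split_csv_tokens_py split_csv_tokens_py_alt
  apply PySem.List.foldl_congr_mem
  intro out token _
  show (pvSplitComma token).foldl _ out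
      = pvFlush (token.toList.foldl pvStepB (out, [])).1 (token.toList.foldl pvStepB (out, [])).2
  rw [pv_machine token.toList out []]
  unfold pvSplitComma
  rw [pv_splitOn_eq]
  cases hms : pvMySplit token.toList with
  | nil => exact absurd hms (pvMySplit_ne_nil _)
  | cons a t =>
    simp only [List.map_cons, List.modifyHead_cons, List.nil_append, List.foldl_cons,
      List.foldl_map]
    rw [← pv_step_eq_flush]
    apply PySem.List.foldl_congr_mem
    intro o seg _
    rw [← pv_step_eq_flush]
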